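-- pv_equiv track=rewrite | github.com/mike235711/python_chess_bit_engine | utils.py | generate_rook_unfull_rays
-- ===== SOURCE A (Python) =====
-- def generate_rook_unfull_rays(square):
--     '''
--     Generating rook ray masks, however the rays end just before reaching the board border (unless already at the border).
--     '''
--     moves = 0
--     r, c = divmod(square, 8)
--     directions = [(1, 0), (-1, 0), (0, 1), (0, -1)]  # vertical and horizontal
--     for dr, dc in directions:
--         nr, nc = r + dr, c + dc
--         if r == 0 and c == 0:  # Then we can go to the 1st row and 1st column, but not the 8th row or 8th column
--             while 0 <= nr < 7 and 0 <= nc < 7: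
--                 moves |= 1 << (nr * 8 + nc)
--                 nr += dr
--                 nc += dc
--         elif r == 0 and c == 7:
--             while 0 <= nr < 7 and 0 < nc <= 7:
--                 moves |= 1 << (nr * 8 + nc)
--                 nr += dr
--                 nc += dc
--         elif r == 7 and c == 0:
--             while 0 < nr <= 7 and 0 <= nc < 7:
--                 moves |= 1 << (nr * 8 + nc)
--                 nr += dr
--                 nc += dc
--         elif r == 7 and c == 7:
--             while 0 < nr <= 7 and 0 < nc <= 7:
--                 moves |= 1 << (nr * 8 + nc)
--                 nr += dr
--                 nc += dc
--         elif r == 0: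
--             while 0 <= nr < 7 and 0 < nc < 7:
--                 moves |= 1 << (nr * 8 + nc)
--                 nr += dr
--                 nc += dc
--         elif r == 7:
--             while 0 < nr <= 7 and 0 < nc < 7:
--                 moves |= 1 << (nr * 8 + nc)
--                 nr += dr
--                 nc += dc
--         elif c == 0:
--             while 0 < nr < 7 and 0 <= nc < 7:
--                 moves |= 1 << (nr * 8 + nc)
--                 nr += dr
--                 nc += dc
--         elif c == 7:
--             while 0 < nr < 7 and 0 < nc <= 7:
--                 moves |= 1 << (nr * 8 + nc)
--                 nr += dr
--                 nc += dc
--         else: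
--             while 0 < nr < 7 and 0 < nc < 7:
--                 moves |= 1 << (nr * 8 + nc)
--                 nr += dr
--                 nc += dc
--     return moves
-- ===== SOURCE B (Python) =====
-- def generate_rook_unfull_rays(square):
--     # Off-board squares have no rays.
--     if not 0 <= square < 64:
--         return 0
--     r, c = divmod(square, 8)
--     lo_r, hi_r = (0 if r == 0 else 1), (7 if r == 7 else 6)
--     lo_c, hi_c = (0 if c == 0 else 1), (7 if c == 7 else 6)
--     moves = 0
--     for cc in range(lo_c, hi_c + 1):
--         if cc != c:
--             moves |= 1 << (r * 8 + cc)
--     for rr in range(lo_r, hi_r + 1):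
--         if rr != r:
--             moves |= 1 << (rr * 8 + c)
--     return moves
-- ===== Notes on version B (the rewrite author's own statement) =====
-- stated objective: simpler
-- what changed: Replaces the nine-way branch cascade with four outward stepping while-loops by per-axis inclusion bounds computed directly from the square's row/column, filled with two flat sweeps (one along the row, one along the column), with a single off-board guard returning 0.
import Mathlib
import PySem

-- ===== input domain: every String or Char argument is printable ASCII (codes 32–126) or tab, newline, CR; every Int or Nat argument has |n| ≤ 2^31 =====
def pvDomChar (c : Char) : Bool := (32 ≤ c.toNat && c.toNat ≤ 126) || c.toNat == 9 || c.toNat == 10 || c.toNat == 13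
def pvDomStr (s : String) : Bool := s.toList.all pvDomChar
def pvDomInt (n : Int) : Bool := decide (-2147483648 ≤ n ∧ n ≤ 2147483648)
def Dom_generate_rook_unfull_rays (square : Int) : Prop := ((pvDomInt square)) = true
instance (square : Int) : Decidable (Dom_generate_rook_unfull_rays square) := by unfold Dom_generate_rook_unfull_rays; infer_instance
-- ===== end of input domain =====

-- B replaces A's nine-way branch cascade of outward directional walks by per-axis
-- inclusion bounds and two flat sweeps (simpler decomposition, same O(1) cost);
-- off-board squares yield 0 in both.


-- ===== PORT A =====
-- One fueled while-loop body shared by the nine `while` loops of A (they differ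
-- only in the stopping condition, passed as `cond`).  Every while in A runs at
-- most 7 iterations (the moving coordinate stays in [0,7] and steps by ±1), so
-- fuel 16 never runs out; the shift index nr*8+nc is nonnegative whenever the
-- loop body runs, so `.toNat` is exact for Python's `1 << (nr*8+nc)`.
def rayLoop : Nat → (Int → Int → Bool) → Int → Int → Int → Int → Int → Int
  | 0, _, _, _, _, _, moves => moves
  | fuel + 1, cond, dr, dc, nr, nc, moves =>
    if cond nr nc then
      rayLoop fuel cond dr dc (nr + dr) (nc + dc) (Int.lor moves ((1 : Int) <<< (nr * 8 + nc).toNat))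
    else moves

-- the body of A's `for dr, dc in directions` loop: the 9-way branch cascade
def rookStep (r c : Int) (moves : Int) (d : Int × Int) : Int :=
  let dr := d.1
  let dc := d.2
  let nr := r + dr
  let nc := c + dc
  if r = 0 ∧ c = 0 then
    rayLoop 16 (fun nr nc => decide (0 ≤ nr ∧ nr < 7 ∧ 0 ≤ nc ∧ nc < 7)) dr dc nr nc moves
  else if r = 0 ∧ c = 7 then
    rayLoop 16 (fun nr nc => decide (0 ≤ nr ∧ nr < 7 ∧ 0 < nc ∧ nc ≤ 7)) dr dc nr nc moves
  else if r = 7 ∧ c = 0 then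
    rayLoop 16 (fun nr nc => decide (0 < nr ∧ nr ≤ 7 ∧ 0 ≤ nc ∧ nc < 7)) dr dc nr nc moves
  else if r = 7 ∧ c = 7 then
    rayLoop 16 (fun nr nc => decide (0 < nr ∧ nr ≤ 7 ∧ 0 < nc ∧ nc ≤ 7)) dr dc nr nc moves
  else if r = 0 then
    rayLoop 16 (fun nr nc => decide (0 ≤ nr ∧ nr < 7 ∧ 0 < nc ∧ nc < 7)) dr dc nr nc moves
  else if r = 7 then
    rayLoop 16 (fun nr nc => decide (0 < nr ∧ nr ≤ 7 ∧ 0 < nc ∧ nc < 7)) dr dc nr nc moves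
  else if c = 0 then
    rayLoop 16 (fun nr nc => decide (0 < nr ∧ nr < 7 ∧ 0 ≤ nc ∧ nc < 7)) dr dc nr nc moves
  else if c = 7 then
    rayLoop 16 (fun nr nc => decide (0 < nr ∧ nr < 7 ∧ 0 < nc ∧ nc ≤ 7)) dr dc nr nc moves
  else
    rayLoop 16 (fun nr nc => decide (0 < nr ∧ nr < 7 ∧ 0 < nc ∧ nc < 7)) dr dc nr nc moves

def generate_rook_unfull_rays (square : Int) : Int :=
  let r := PySem.Int.floordiv square 8
  let c := PySem.Int.mod square 8
  let directions : List (Int × Int) := [(1, 0), (-1, 0), (0, 1), (0, -1)]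
  directions.foldl (rookStep r c) 0

-- ===== PORT B =====
def generate_rook_unfull_rays_alt (square : Int) : Int :=
  if ¬ (0 ≤ square ∧ square < 64) then 0
  else
    let r := PySem.Int.floordiv square 8
    let c := PySem.Int.mod square 8
    let lo_r : Int := if r = 0 then 0 else 1
    let hi_r : Int := if r = 7 then 7 else 6
    let lo_c : Int := if c = 0 then 0 else 1
    let hi_c : Int := if c = 7 then 7 else 6
    let moves :=
      (PySem.List.pyRange lo_c (hi_c + 1) 1).foldl
        (fun moves cc => if cc ≠ c then Int.lor moves ((1 : Int) <<< (r * 8 + cc).toNat) else moves) 0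
    (PySem.List.pyRange lo_r (hi_r + 1) 1).foldl
      (fun moves rr => if rr ≠ r then Int.lor moves ((1 : Int) <<< (rr * 8 + c).toNat) else moves) moves

-- ===== PRECONDITION & SPEC =====
def Spec_generate_rook_unfull_rays (square : Int) (out : Int) : Prop := out = generate_rook_unfull_rays_alt square
instance (square : Int) (out : Int) : Decidable (Spec_generate_rook_unfull_rays square out) := by unfold Spec_generate_rook_unfull_rays; infer_instance

-- ===== CLAIM (what is proved, stated in full; the proofs are below) =====
def Claim_equal_generate_rook_unfull_rays : Prop := ∀ (square : Int), Dom_generate_rook_unfull_rays square → Spec_generate_rook_unfull_rays square (generate_rook_unfull_rays square)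

-- ===== LEMMAS AND PROOFS =====
lemma rayLoop_stop (fuel : Nat) (cond : Int → Int → Bool) (dr dc nr nc moves : Int)
    (h : cond nr nc = false) : rayLoop fuel cond dr dc nr nc moves = moves := by
  cases fuel <;> simp [rayLoop, h]

lemma rookStep_off (r c dr dc moves : Int) (hr : r ≤ -1 ∨ 8 ≤ r)
    (hdr : -1 ≤ dr ∧ dr ≤ 1) : rookStep r c moves (dr, dc) = moves := by
  unfold rookStep
  simp only
  split_ifs <;>
    first
      | omega
      | (rw [rayLoop_stop] ; simp only [decide_eq_false_iff_not] ; omega)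

lemma offboard_A (square : Int) (h : square < 0 ∨ 64 ≤ square) :
    generate_rook_unfull_rays square = 0 := by
  unfold generate_rook_unfull_rays
  have hd : PySem.Int.floordiv square 8 = square / 8 :=
    PySem.Int.floordiv_eq_ediv_of_pos (by omega)
  simp only [hd, List.foldl]
  have hr : square / 8 ≤ -1 ∨ 8 ≤ square / 8 := by omega
  rw [rookStep_off _ _ _ _ _ hr (by omega), rookStep_off _ _ _ _ _ hr (by omega),
      rookStep_off _ _ _ _ _ hr (by omega), rookStep_off _ _ _ _ _ hr (by omega)]

lemma offboard_B (square : Int) (h : square < 0 ∨ 64 ≤ square) :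
    generate_rook_unfull_rays_alt square = 0 := by
  unfold generate_rook_unfull_rays_alt
  rw [if_pos]
  omega

lemma onboard_eq (square : Int) (h0 : 0 ≤ square) (h64 : square < 64) :
    generate_rook_unfull_rays square = generate_rook_unfull_rays_alt square := by
  interval_cases square <;> decide

-- ===== VERDICT (by name: the statement is the Claim_ definition above) =====
theorem generate_rook_unfull_rays_spec : Claim_equal_generate_rook_unfull_rays := by
  intro square _
  unfold Spec_generate_rook_unfull_rays
  by_cases h : 0 ≤ square ∧ square < 64
  · exact onboard_eq square h.1 h.2
  · rw [offboard_A square (by omega), offboard_B square (by omega)]
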